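-- pv_equiv track=rewrite | github.com/kupl/Graphick | Heap_Abstracton/heap_merge_strategies.py | strategy_partial_allocsite_keyword
-- ===== SOURCE A (Python) =====
-- def strategy_partial_allocsite_keyword(obj_type_map, keywords):
--     print ('allocsites : {}'.format(len(keywords)))
--
--     keytype_rep_map = {}
--     rst = {}
--
--     for obj in obj_type_map.keys():
--         if obj in keywords:
--             rst[obj] = obj
--         else:
--             if obj_type_map[obj] not in keytype_rep_map.keys():
--                 keytype_rep_map[obj_type_map[obj]] = obj
--             rst[obj] = keytype_rep_map[obj_type_map[obj]]
--     return rst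
-- ===== SOURCE B (Python) =====
-- def strategy_partial_allocsite_keyword(obj_type_map, keywords):
--     print ('allocsites : {}'.format(len(keywords)))
--
--     # No representative table: each non-keyword object looks up its representative
--     # directly as the FIRST non-keyword object of the same type in iteration order
--     # (the object itself always qualifies, so the default is never used).
--     rst = {}
--     for obj, t in obj_type_map.items():
--         if obj in keywords:
--             rst[obj] = obj
--         else:
--             rst[obj] = next((o for o, u in obj_type_map.items()
--                              if u == t and o not in keywords), obj)
--     return rst
-- ===== Notes on version B (the rewrite author's own statement) =====
-- stated objective: alternative
-- what changed: Drops A's memoized type->representative dict entirely: for each non-keyword object B rescans obj_type_map and takes the first non-keyword object of the same type as its representative (brute-force search instead of an incrementally built table), trading A's O(n) memoization for a table-free O(n^2) scan.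
import Mathlib
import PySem

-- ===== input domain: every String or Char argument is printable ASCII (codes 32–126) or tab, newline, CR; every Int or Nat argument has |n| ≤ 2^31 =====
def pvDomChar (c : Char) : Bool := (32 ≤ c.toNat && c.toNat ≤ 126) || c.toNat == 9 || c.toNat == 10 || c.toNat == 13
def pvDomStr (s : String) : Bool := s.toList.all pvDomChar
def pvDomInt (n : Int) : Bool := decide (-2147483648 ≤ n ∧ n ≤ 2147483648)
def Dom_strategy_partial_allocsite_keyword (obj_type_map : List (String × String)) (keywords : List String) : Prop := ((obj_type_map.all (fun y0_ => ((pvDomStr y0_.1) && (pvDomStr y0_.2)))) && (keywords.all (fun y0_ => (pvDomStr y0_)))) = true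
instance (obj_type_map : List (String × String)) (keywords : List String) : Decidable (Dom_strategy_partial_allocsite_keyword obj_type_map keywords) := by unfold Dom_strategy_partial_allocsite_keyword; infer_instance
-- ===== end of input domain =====

-- B drops A's memoized type->representative dict: each non-keyword object finds its
-- representative by rescanning obj_type_map for the first non-keyword object of the same
-- type (table-free brute-force search; objective: alternative, not faster).


-- ===== PORT A =====
-- one step of A's loop body over a key obj: state = (keytype_rep_map, rst);
-- 'obj_type_map[obj]' is d.getD obj "" (obj comes from d.keys, so the default is never used)
def pvStepA (keywords : List String) (d : PySem.Dict String String)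
    (s : PySem.Dict String String × PySem.Dict String String) (obj : String) :
    PySem.Dict String String × PySem.Dict String String :=
  if keywords.contains obj then (s.1, s.2.insert obj obj)
  else
    let t := d.getD obj ""
    let krm := if s.1.contains t then s.1 else s.1.insert t obj
    (krm, s.2.insert obj (krm.getD t ""))

def strategy_partial_allocsite_keyword (obj_type_map : List (String × String)) (keywords : List String) : List (String × String) :=
  let d := PySem.Dict.ofList obj_type_map
  (d.keys.foldl (pvStepA keywords d) (PySem.Dict.empty, PySem.Dict.empty)).2.items

-- ===== PORT B =====
-- Source B's 'next((o for o, u in … if u == t and o not in keywords), obj)': first match, else default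
def pvFirstRep (items : List (String × String)) (keywords : List String) (t : String) (dflt : String) : String :=
  ((items.find? (fun q => !keywords.contains q.1 && q.2 == t)).map Prod.fst).getD dflt

-- Source B's loop fills rst over d's distinct keys in order
def strategy_partial_allocsite_keyword_alt (obj_type_map : List (String × String)) (keywords : List String) : List (String × String) :=
  let d := PySem.Dict.ofList obj_type_map
  (d.items.foldl (fun r p => r.insert p.1
      (if keywords.contains p.1 then p.1 else pvFirstRep d.items keywords p.2 p.1))
    PySem.Dict.empty).items

-- ===== PRECONDITION & SPEC =====
def Spec_strategy_partial_allocsite_keyword (obj_type_map : List (String × String)) (keywords : List String) (out : List (String × String)) : Prop := out = strategy_partial_allocsite_keyword_alt obj_type_map keywords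
instance (obj_type_map : List (String × String)) (keywords : List String) (out : List (String × String)) : Decidable (Spec_strategy_partial_allocsite_keyword obj_type_map keywords out) := by unfold Spec_strategy_partial_allocsite_keyword; infer_instance

-- ===== CLAIM (what is proved, stated in full; the proofs are below) =====
def Claim_equal_strategy_partial_allocsite_keyword : Prop := ∀ (obj_type_map : List (String × String)) (keywords : List String), Dom_strategy_partial_allocsite_keyword obj_type_map keywords → Spec_strategy_partial_allocsite_keyword obj_type_map keywords (strategy_partial_allocsite_keyword obj_type_map keywords)

-- ===== LEMMAS AND PROOFS =====

-- Python setdefault is A's explicit "if t not in keys: insert"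
theorem pv_setdefault_eq (m : PySem.Dict String String) (k v : String) :
    m.setdefault k v = if m.contains k then m else m.insert k v := by
  by_cases h : m.contains k = true
  · rw [if_pos h]; exact PySem.Dict.setdefault_of_contains m v h
  · rw [if_neg h]; exact PySem.Dict.setdefault_of_not_contains m v (Bool.not_eq_true _ ▸ h)

-- A's rep-table fold, with a general start
def pvRepFold (keywords : List String) (items : List (String × String))
    (m : PySem.Dict String String) : PySem.Dict String String :=
  items.foldl (fun m p => if keywords.contains p.1 then m else m.setdefault p.2 p.1) m

-- the rep table only ever gains keys: an entry already present keeps its value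
theorem pvRepFold_mono (keywords : List String) (l : List (String × String))
    (m : PySem.Dict String String) (t dv : String) (h : m.contains t = true) :
    (pvRepFold keywords l m).getD t dv = m.getD t dv := by
  induction l generalizing m with
  | nil => rfl
  | cons p rest ih =>
    show (pvRepFold keywords rest
        (if keywords.contains p.1 then m else m.setdefault p.2 p.1)).getD t dv = m.getD t dv
    by_cases hk : keywords.contains p.1 = true
    · rw [if_pos hk]; exact ih m h
    · rw [if_neg hk, pv_setdefault_eq]
      by_cases hc : m.contains p.2 = true
      · rw [if_pos hc]; exact ih m h
      · rw [if_neg hc]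
        have hne : t ≠ p.2 := by
          intro e; rw [e] at h; exact hc h
        rw [ih (m.insert p.2 p.1) (by simp [PySem.Dict.contains_insert, h]),
            PySem.Dict.getD_insert_of_ne m p.1 dv hne]

-- A's memo table, read at a key it never held before the loop, is B's first-match search
theorem pvRepFold_eq_find (keywords : List String) (l : List (String × String))
    (m : PySem.Dict String String) (t dv : String) (h : m.contains t = false) :
    (pvRepFold keywords l m).getD t dv
      = ((l.find? (fun q => !keywords.contains q.1 && q.2 == t)).map Prod.fst).getD dv := by
  induction l generalizing m with
  | nil =>
    show m.getD t dv = dv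
    exact PySem.Dict.getD_of_not_contains m dv h
  | cons p rest ih =>
    show (pvRepFold keywords rest
        (if keywords.contains p.1 then m else m.setdefault p.2 p.1)).getD t dv = _
    by_cases hk : keywords.contains p.1 = true
    · rw [if_pos hk, ih m h, List.find?_cons_of_neg
        (by show ¬(!keywords.contains p.1 && p.2 == t) = true; rw [hk]; simp)]
    · have hk' : p.1 ∉ keywords := by simpa using hk
      rw [if_neg hk, pv_setdefault_eq]
      by_cases ht : p.2 = t
      · have hc : m.contains p.2 = false := ht ▸ h
        rw [if_neg (by simp [hc]), List.find?_cons_of_pos (by simp [hk', ht])]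
        have hct : (m.insert p.2 p.1).contains t = true := by
          rw [← ht]; exact PySem.Dict.contains_insert_self m p.2 p.1
        rw [pvRepFold_mono keywords rest _ t dv hct, ← ht]
        simp
      · rw [List.find?_cons_of_neg (by simp [ht])]
        by_cases hc : m.contains p.2 = true
        · rw [if_pos hc]; exact ih m h
        · rw [if_neg hc]
          exact ih (m.insert p.2 p.1)
            (by simp [PySem.Dict.contains_insert, h, Ne.symm ht])

-- A's loop over pairs (one step = pvStepA with the lookup already performed)
def pvStepA' (keywords : List String)
    (s : PySem.Dict String String × PySem.Dict String String) (p : String × String) :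
    PySem.Dict String String × PySem.Dict String String :=
  if keywords.contains p.1 then (s.1, s.2.insert p.1 p.1)
  else
    let krm := if s.1.contains p.2 then s.1 else s.1.insert p.2 p.1
    (krm, s.2.insert p.1 (krm.getD p.2 ""))

-- main invariant: A's interleaved loop fills rst exactly with values read off the FINAL rep table
theorem pv_main (keywords : List String) (l : List (String × String))
    (m r : PySem.Dict String String) :
    (l.foldl (pvStepA' keywords) (m, r)).2
      = l.foldl (fun r p => r.insert p.1
          (if keywords.contains p.1 then p.1 else (pvRepFold keywords l m).getD p.2 "")) r := by
  induction l generalizing m r with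
  | nil => rfl
  | cons p rest ih =>
    simp only [List.foldl_cons]
    by_cases hk : keywords.contains p.1 = true
    · have hstep : pvStepA' keywords (m, r) p = (m, r.insert p.1 p.1) := by
        simp only [pvStepA']; rw [if_pos hk]
      have hrep : pvRepFold keywords (p :: rest) m = pvRepFold keywords rest m := by
        show pvRepFold keywords rest (if keywords.contains p.1 then m else m.setdefault p.2 p.1)
            = pvRepFold keywords rest m
        rw [if_pos hk]
      rw [hstep, ih, hrep, if_pos hk]
    · set krm := if m.contains p.2 then m else m.insert p.2 p.1 with hkrm
      have hstep : pvStepA' keywords (m, r) p = (krm, r.insert p.1 (krm.getD p.2 "")) := by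
        simp only [pvStepA']; rw [if_neg hk]
      have hrep : pvRepFold keywords (p :: rest) m = pvRepFold keywords rest krm := by
        show pvRepFold keywords rest (if keywords.contains p.1 then m else m.setdefault p.2 p.1)
            = pvRepFold keywords rest krm
        rw [if_neg hk, pv_setdefault_eq, hkrm]
      have hct : krm.contains p.2 = true := by
        rw [hkrm]; by_cases hc : m.contains p.2 = true
        · rw [if_pos hc]; exact hc
        · rw [if_neg hc]; exact PySem.Dict.contains_insert_self m p.2 p.1
      rw [hstep, ih, hrep, pvRepFold_mono keywords rest krm p.2 "" hct, if_neg hk]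

theorem strategy_partial_allocsite_keyword_core (obj_type_map : List (String × String))
    (keywords : List String) :
    strategy_partial_allocsite_keyword obj_type_map keywords
      = strategy_partial_allocsite_keyword_alt obj_type_map keywords := by
  show ((PySem.Dict.ofList obj_type_map).keys.foldl
          (pvStepA keywords (PySem.Dict.ofList obj_type_map))
          (PySem.Dict.empty, PySem.Dict.empty)).2.items
      = ((PySem.Dict.ofList obj_type_map).items.foldl (fun r p => r.insert p.1
            (if keywords.contains p.1 then p.1
             else pvFirstRep (PySem.Dict.ofList obj_type_map).items keywords p.2 p.1))
          PySem.Dict.empty).items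
  set d := PySem.Dict.ofList obj_type_map with hd
  have hnd : d.keys.Nodup := hd ▸ PySem.Dict.nodup_keys_ofList obj_type_map
  have hitems : d.items = d.keys.map (fun k => (k, d.getD k "")) :=
    PySem.Dict.items_eq_map_keys d hnd ""
  -- A's keys-loop is the pairs-loop over d.items
  have hbridge : d.keys.foldl (pvStepA keywords d) (PySem.Dict.empty, PySem.Dict.empty)
      = d.items.foldl (pvStepA' keywords) (PySem.Dict.empty, PySem.Dict.empty) := by
    rw [hitems, List.foldl_map]
    rfl
  rw [hbridge, pv_main]
  -- the two insert loops write the same value at every key of d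
  congr 1
  apply PySem.List.foldl_congr_mem' (l := d.items)
  intro p hp acc
  by_cases hk : keywords.contains p.1 = true
  · rw [if_pos hk, if_pos hk]
  · rw [if_neg hk, if_neg hk]
    -- p itself matches B's search predicate, so the search succeeds and defaults are moot
    have hk' : p.1 ∉ keywords := by simpa using hk
    have hpred : (!keywords.contains p.1 && p.2 == p.2) = true := by simp [hk']
    have hsome : (d.items.find? (fun q => !keywords.contains q.1 && q.2 == p.2)).isSome := by
      rw [List.find?_isSome]; exact ⟨p, hp, hpred⟩
    obtain ⟨q, hq⟩ := Option.isSome_iff_exists.mp hsome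
    rw [pvRepFold_eq_find keywords d.items PySem.Dict.empty p.2 ""
          (PySem.Dict.contains_empty p.2)]
    congr 1
    unfold pvFirstRep
    rw [hq]
    rfl

-- ===== VERDICT (by name: the statement is the Claim_ definition above) =====
theorem strategy_partial_allocsite_keyword_spec : Claim_equal_strategy_partial_allocsite_keyword := by
  intro obj_type_map keywords _
  exact strategy_partial_allocsite_keyword_core obj_type_map keywords
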